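-- pv_equiv track=rewrite | github.com/Kimrama/OOD-Labs | week10/10-5-box.py | find_minimum_max_weight
-- ===== SOURCE A (Python) =====
-- def test_pack(items, max_weight, k):
--     current_weight = 0
--     box_count = 1
--
--     for item in items:
--         if current_weight + item > max_weight:
--             box_count += 1
--             current_weight = item
--             if box_count > k:
--                 return False
--         else:
--             current_weight += item
--
--     return True
--
-- def find_minimum_max_weight(items, k):
--     low = max(items)
--     high = sum(items)
--
--     while low < high:
--         mid = (low + high) // 2
--
--         if test_pack(items, mid, k):
--             high = mid
--         else:
--             low = mid + 1
--
--     return low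
-- ===== SOURCE B (Python) =====
-- def find_minimum_max_weight(items, k):
--     cap = k if k > 1 else 1
--
--     def groups(w):
--         # final greedy group count for capacity w, carried as one (count, load) state
--         state = (1, 0)
--         for x in items:
--             state = (state[0] + 1, x) if state[1] + x > w else (state[0], state[1] + x)
--         return state[0]
--
--     def search(lo, hi):
--         if lo >= hi:
--             return lo
--         mid = lo + (hi - lo) // 2
--         return search(lo, mid) if groups(mid) <= cap else search(mid + 1, hi)
--
--     return search(max(items), sum(items))
-- ===== Notes on version B (the rewrite author's own statement) =====
-- stated objective: alternative
-- what changed: Same bisection-on-answer semantics (forced: with negative items the feasibility predicate is non-monotone, so the result is the exact bisection path's), but restructured throughout: recursive search instead of a while loop, overflow-style midpoint lo+(hi-lo)//2 instead of (lo+hi)//2, and a single (count,load)-state pass whose final group count is compared against max(k,1) instead of A's early-exit test_pack that threads k through the loop.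
import Mathlib
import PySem

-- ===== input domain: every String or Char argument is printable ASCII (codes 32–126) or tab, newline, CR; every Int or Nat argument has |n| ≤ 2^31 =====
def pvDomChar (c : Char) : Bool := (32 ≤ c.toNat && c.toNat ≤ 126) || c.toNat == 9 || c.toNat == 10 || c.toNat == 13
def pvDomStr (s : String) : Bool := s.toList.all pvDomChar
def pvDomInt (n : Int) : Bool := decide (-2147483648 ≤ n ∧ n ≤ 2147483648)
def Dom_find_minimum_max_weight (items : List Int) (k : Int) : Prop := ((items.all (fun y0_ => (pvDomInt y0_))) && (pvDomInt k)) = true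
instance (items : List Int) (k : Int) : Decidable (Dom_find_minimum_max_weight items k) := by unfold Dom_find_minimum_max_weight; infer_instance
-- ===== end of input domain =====

-- B keeps A's exact bisection semantics (forced by non-monotone feasibility on negative items) but is
-- restructured: recursive search, midpoint lo+(hi-lo)//2, and a (count,load)-state pass compared to max(k,1)
-- instead of A's early-exit k-threaded test_pack. Objective: alternative decomposition, same cost.

-- ===== PORT A =====
-- the for-loop of test_pack: state (current_weight = c, box_count = b), early return False
def testPackLoop (w k : Int) : List Int → Int → Int → Bool
  | [], _, _ => true
  | x :: rest, c, b =>
    if c + x > w then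
      if b + 1 > k then false else testPackLoop w k rest x (b + 1)
    else testPackLoop w k rest (c + x) b

def test_pack (items : List Int) (max_weight k : Int) : Bool :=
  testPackLoop max_weight k items 0 1

-- the while-loop of A; fuel (high - low).toNat suffices: the bracket width shrinks by ≥ 1 per
-- iteration (fuel only makes the loop total; the branch structure is A's)
def bisectAGo (items : List Int) (k : Int) : Nat → Int → Int → Int
  | 0, low, _ => low
  | fuel + 1, low, high =>
    if low < high then
      let mid := PySem.Int.floordiv (low + high) 2
      if test_pack items mid k then bisectAGo items k fuel low mid
      else bisectAGo items k fuel (mid + 1) high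
    else low

-- max(items) raises on []; Pre_ excludes that input, the port returns 0 there
def find_minimum_max_weight (items : List Int) (k : Int) : Int :=
  let low := (PySem.List.max? items (fun x => x)).getD 0
  bisectAGo items k (items.sum - low).toNat low items.sum

-- ===== PORT B =====
-- groups: one pass carrying a single (count, load) pair, no early exit, no k inside
def groupsB (items : List Int) (w : Int) : Int :=
  (items.foldl (fun s x => if s.2 + x > w then (s.1 + 1, x) else (s.1, s.2 + x)) (1, 0)).1

-- B's recursive search, same fuel bound making the recursion total
def searchBGo (items : List Int) (cap : Int) : Nat → Int → Int → Int
  | 0, lo, _ => lo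
  | fuel + 1, lo, hi =>
    if lo ≥ hi then lo
    else
      let mid := lo + PySem.Int.floordiv (hi - lo) 2
      if groupsB items mid ≤ cap then searchBGo items cap fuel lo mid
      else searchBGo items cap fuel (mid + 1) hi

def find_minimum_max_weight_alt (items : List Int) (k : Int) : Int :=
  let cap := if k > 1 then k else 1
  let lo := (PySem.List.max? items (fun x => x)).getD 0
  searchBGo items cap (items.sum - lo).toNat lo items.sum

-- ===== PRECONDITION & SPEC =====
-- Pre_ excludes only the empty list, on which Python A (and B) raises ValueError from max(items)
def Pre_find_minimum_max_weight (items : List Int) (k : Int) : Prop := items ≠ []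
instance (items : List Int) (k : Int) : Decidable (Pre_find_minimum_max_weight items k) := by unfold Pre_find_minimum_max_weight; infer_instance
def pvWitness_find_minimum_max_weight : List Int × Int := ([3, 1, 4, 1, 5], 2)

def Spec_find_minimum_max_weight (items : List Int) (k : Int) (out : Int) : Prop := out = find_minimum_max_weight_alt items k
instance (items : List Int) (k : Int) (out : Int) : Decidable (Spec_find_minimum_max_weight items k out) := by unfold Spec_find_minimum_max_weight; infer_instance

-- ===== CLAIM (what is proved, stated in full; the proofs are below) =====
def Claim_equal_find_minimum_max_weight : Prop := ∀ (items : List Int) (k : Int), Dom_find_minimum_max_weight items k → Pre_find_minimum_max_weight items k → Spec_find_minimum_max_weight items k (find_minimum_max_weight items k)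

-- ===== LEMMAS AND PROOFS =====

-- the fold's count component never decreases
lemma groups_fold_ge (w : Int) (rest : List Int) (b c : Int) :
    b ≤ (rest.foldl (fun s x => if s.2 + x > w then (s.1 + 1, x) else (s.1, s.2 + x)) (b, c)).1 := by
  induction rest generalizing b c with
  | nil => simp
  | cons x rest ih =>
    simp only [List.foldl]
    split_ifs
    · exact le_trans (by omega) (ih (b + 1) x)
    · exact ih b (c + x)

-- A's early-exit loop answers exactly "final fold count ≤ max(k,1)"
lemma testPackLoop_eq_fold (w k : Int) (cap : Int) (hcap : cap = if k > 1 then k else 1) :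
    ∀ (rest : List Int) (c b : Int), 1 ≤ b → b ≤ cap →
      testPackLoop w k rest c b =
        decide ((rest.foldl (fun s x => if s.2 + x > w then (s.1 + 1, x) else (s.1, s.2 + x)) (b, c)).1 ≤ cap) := by
  intro rest
  induction rest with
  | nil => intro c b h1 h2; simp [testPackLoop, h2]
  | cons x rest ih =>
    intro c b h1 h2
    simp only [testPackLoop, List.foldl]
    by_cases hs : c + x > w
    · simp only [if_pos hs]
      by_cases hk : b + 1 > k
      · have hcap' : b + 1 > cap := by subst hcap; split_ifs <;> omega
        have := groups_fold_ge w rest (b + 1) x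
        simp only [if_pos hk]
        symm; simp only [decide_eq_false_iff_not]; omega
      · have hle : b + 1 ≤ cap := by subst hcap; split_ifs <;> omega
        simp only [if_neg hk]
        exact ih x (b + 1) (by omega) hle
    · simp only [if_neg hs]
      exact ih (c + x) b h1 h2

lemma test_pack_eq_groups (items : List Int) (k w cap : Int) (hcap : cap = if k > 1 then k else 1) :
    test_pack items w k = decide (groupsB items w ≤ cap) := by
  have h2 : (1:Int) ≤ cap := by subst hcap; split_ifs <;> omega
  simpa [test_pack, groupsB] using testPackLoop_eq_fold w k cap hcap items 0 1 (le_refl 1) h2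

-- the two midpoint formulas agree
lemma mid_eq (lo hi : Int) : PySem.Int.floordiv (lo + hi) 2 = lo + PySem.Int.floordiv (hi - lo) 2 := by
  rw [PySem.Int.floordiv_eq_ediv_of_pos (by norm_num), PySem.Int.floordiv_eq_ediv_of_pos (by norm_num)]
  omega

lemma bisect_eq_search (items : List Int) (k cap : Int) (hcap : cap = if k > 1 then k else 1) :
    ∀ (fuel : Nat) (lo hi : Int), bisectAGo items k fuel lo hi = searchBGo items cap fuel lo hi := by
  intro fuel
  induction fuel with
  | zero => intro lo hi; rfl
  | succ fuel ih =>
    intro lo hi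
    simp only [bisectAGo, searchBGo]
    by_cases h : lo < hi
    · have hge : ¬ lo ≥ hi := by omega
      simp only [if_pos h, if_neg hge]
      rw [test_pack_eq_groups items k _ cap hcap, ← mid_eq lo hi]
      by_cases hp : groupsB items (PySem.Int.floordiv (lo + hi) 2) ≤ cap
      · simp only [hp, decide_true, if_true]
        exact ih lo _
      · simp only [hp, decide_false, Bool.false_eq_true, if_false]
        exact ih _ hi
    · simp [h, show lo ≥ hi by omega]

-- ===== VERDICT (by name: the statement is the Claim_ definition above) =====
theorem find_minimum_max_weight_spec : Claim_equal_find_minimum_max_weight := by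
  intro items k _ _
  unfold Spec_find_minimum_max_weight find_minimum_max_weight find_minimum_max_weight_alt
  exact bisect_eq_search items k _ rfl _ _ _
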